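-- pv_equiv track=rewrite | github.com/bohuiKang/SSAFY-Algorithm-Study | 2602_february/feb_week4/퍼즐 게임 챌린지/yj_puzzle.py | solution
-- ===== SOURCE A (Python) =====
-- def solution(diffs, times, limit):
--     # diff 현재 퍼즐의 난이도
--     # time_cur 현재 퍼즐의 소요 시간
--     # time_prev 이전 퍼즐의 소요 시간
--     # level 숙련도
--
--     answer = 0  # 답 구해졌나?
--     n = len(diffs)  # n 퍼즐의 개수
--     # level 이분탐색
--     left = 1
--     right = max(diffs)  # 최대 난이도만큼 레벨이면 무조건 통과
--
--     while left < right: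
--         mid_level = (left + right) // 2
--         time = 0  # 현재 레벨로 퍼즐을 다 푸는 데 걸리는 시간
--
--         # 퍼즐 다 풀기
--         for i in range(n):  # 퍼즐 하나 풀기 * n번
--
--             diff = diffs[i]  # diff 현재 퍼즐의 난이도
--             time_cur = times[i]  # time_cur 현재 퍼즐의 소요 시간
--             # 이전 퍼즐이 있다면 time_prev도 생성
--
--             if diff <= mid_level:  # diff ≤ level이면 퍼즐을 틀리지 않고 time_cur만큼의 시간을 사용하여 해결합니다.
--                 time += time_cur
--             elif diff > mid_level:  # diff > level이면, 퍼즐을 총 diff - level번 틀립니다.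
--                 if i > 0:
--                     time_prev = times[i - 1]  # time_prev 이전 퍼즐의 소요 시간
--                     time += (time_cur + time_prev) * (diff - mid_level) + time_cur
--                 else:
--                     time += time_cur * (diff - mid_level) + time_cur
--
--         # time이 limit을 넘기지 않았으면 answer 갱신하고 레벨 범위 높이기
--         if time <= limit:  # 레벨이 너무 높음
--             right = mid_level
--         else:  # 레벨이 너무 낮음
--             left = mid_level + 1
--
--
--     return right
-- ===== SOURCE B (Python) =====
-- def solution(diffs, times, limit):
--     n = len(diffs)
--     total = sum(times[:n])
--     # cost of one failed attempt at puzzle i: current time plus time to redo the previous puzzle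
--     pairs = sorted(((diffs[i], times[i] + (times[i - 1] if i > 0 else 0)) for i in range(n)),
--                    key=lambda p: p[0])
--     ds = [d for d, _ in pairs]
--     # prefix sums of costs and of cost*difficulty
--     p0, p1 = [0], [0]
--     s0 = s1 = 0
--     for d, c in pairs:
--         s0 += c
--         s1 += c * d
--         p0.append(s0)
--         p1.append(s1)
--     left, right = 1, max(diffs)
--     while left < right:
--         mid = (left + right) // 2
--         # first index with ds[k] > mid (hand-written bisect_right; A imports nothing)
--         lo, hi = 0, n
--         while lo < hi:
--             m = (lo + hi) // 2
--             if ds[m] <= mid: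
--                 lo = m + 1
--             else:
--                 hi = m
--         t = total + (p1[n] - p1[lo]) - mid * (p0[n] - p0[lo])
--         if t <= limit:
--             right = mid
--         else:
--             left = mid + 1
--     return right
-- ===== Notes on version B (the rewrite author's own statement) =====
-- stated objective: alternative
-- what changed: B sorts the puzzles by difficulty once and builds prefix sums of the per-failure costs, then evaluates the total time at each binary-search midpoint with a hand-written bisect plus two prefix-sum lookups instead of A's rescan of all puzzles per midpoint; it trades A's O(n) work per midpoint for an O(n log n) preprocessing pass and O(log n) per midpoint.
-- outside the precondition, e.g. on solution([1], [], 0): A returns 1, B raises IndexError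
import Mathlib
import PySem

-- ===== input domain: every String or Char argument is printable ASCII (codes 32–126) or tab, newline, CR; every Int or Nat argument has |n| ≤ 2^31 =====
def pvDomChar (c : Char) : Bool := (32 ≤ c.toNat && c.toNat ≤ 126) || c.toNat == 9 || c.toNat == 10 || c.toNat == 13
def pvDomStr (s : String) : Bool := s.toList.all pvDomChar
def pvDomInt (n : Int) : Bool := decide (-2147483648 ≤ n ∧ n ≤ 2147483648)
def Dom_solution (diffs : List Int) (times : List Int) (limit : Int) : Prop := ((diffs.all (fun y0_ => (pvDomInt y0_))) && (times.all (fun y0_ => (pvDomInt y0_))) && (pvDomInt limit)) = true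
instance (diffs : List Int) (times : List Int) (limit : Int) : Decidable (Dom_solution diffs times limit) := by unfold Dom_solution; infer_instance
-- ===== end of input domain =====

-- B replaces A's rescan of all puzzles at every binary-search midpoint by a
-- sort-by-difficulty + prefix sums + bisect evaluation of the total time (alternative algorithm).

-- ===== PORT A =====

-- the inner 'for i in range(n)' loop of A computing 'time' for a given mid_level
def timeA (diffs times : List Int) (mid : Int) : Int :=
  (PySem.List.pyRange 0 (diffs.length : Int) 1).foldl (fun time i =>
    let diff := PySem.List.pyGetD diffs i 0
    let time_cur := PySem.List.pyGetD times i 0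
    if diff ≤ mid then time + time_cur
    else if mid < diff then
      if 0 < i then
        let time_prev := PySem.List.pyGetD times (i - 1) 0
        time + (time_cur + time_prev) * (diff - mid) + time_cur
      else time + time_cur * (diff - mid) + time_cur
    else time) 0

-- A's 'while left < right' binary search (fuel = (right - left).toNat, an upper
-- bound on the iteration count, makes the recursion structural; the guard is
-- only a totalization device, the loop body is A's)
def loopA (diffs times : List Int) (limit : Int) : Nat → Int → Int → Int
  | 0, _, right => right
  | fuel + 1, left, right =>
    if left < right then
      let mid := PySem.Int.floordiv (left + right) 2
      if timeA diffs times mid ≤ limit then loopA diffs times limit fuel left mid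
      else loopA diffs times limit fuel (mid + 1) right
    else right

def solution (diffs : List Int) (times : List Int) (limit : Int) : Int :=
  loopA diffs times limit (((PySem.List.max? diffs (fun x => x)).getD 0) - 1).toNat 1
    ((PySem.List.max? diffs (fun x => x)).getD 0)

-- ===== PORT B =====

-- pairs = sorted(((diffs[i], times[i] + (times[i-1] if i > 0 else 0)) for i in range(n)), key=lambda p: p[0])
def bPairs (diffs times : List Int) : List (Int × Int) :=
  PySem.List.sorted
    ((PySem.List.pyRange 0 (diffs.length : Int) 1).map (fun i =>
      (PySem.List.pyGetD diffs i 0,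
       PySem.List.pyGetD times i 0 +
         (if 0 < i then PySem.List.pyGetD times (i - 1) 0 else 0))))
    (fun p => p.1) false

-- the 'for d, c in pairs' loop building p0, p1 with running sums s0, s1
def bPrefix (pairs : List (Int × Int)) : List Int × List Int :=
  let st := pairs.foldl (fun (st : Int × Int × List Int × List Int) dc =>
      let s0 := st.1 + dc.2
      let s1 := st.2.1 + dc.2 * dc.1
      (s0, s1, st.2.2.1 ++ [s0], st.2.2.2 ++ [s1])) (0, 0, [0], [0])
  (st.2.2.1, st.2.2.2)

-- the hand-written bisect_right loop 'while lo < hi' (fuel as above)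
def bisectB (ds : List Int) (mid : Int) : Nat → Int → Int → Int
  | 0, lo, _ => lo
  | fuel + 1, lo, hi =>
    if lo < hi then
      let m := PySem.Int.floordiv (lo + hi) 2
      if PySem.List.pyGetD ds m 0 ≤ mid then bisectB ds mid fuel (m + 1) hi
      else bisectB ds mid fuel lo m
    else lo

-- t = total + (p1[n] - p1[lo]) - mid * (p0[n] - p0[lo])
def timeB (total : Int) (ds p0 p1 : List Int) (n mid : Int) : Int :=
  let lo := bisectB ds mid n.toNat 0 n
  total + (PySem.List.pyGetD p1 n 0 - PySem.List.pyGetD p1 lo 0)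
        - mid * (PySem.List.pyGetD p0 n 0 - PySem.List.pyGetD p0 lo 0)

-- B's 'while left < right' binary search (fuel as above)
def loopB (total : Int) (ds p0 p1 : List Int) (n limit : Int) : Nat → Int → Int → Int
  | 0, _, right => right
  | fuel + 1, left, right =>
    if left < right then
      let mid := PySem.Int.floordiv (left + right) 2
      if timeB total ds p0 p1 n mid ≤ limit then loopB total ds p0 p1 n limit fuel left mid
      else loopB total ds p0 p1 n limit fuel (mid + 1) right
    else right

def solution_alt (diffs : List Int) (times : List Int) (limit : Int) : Int :=
  let n : Int := (diffs.length : Int)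
  let total := (PySem.List.slice times none (some n)).sum
  let pairs := bPairs diffs times
  let ds := pairs.map (fun p => p.1)
  let pp := bPrefix pairs
  loopB total ds pp.1 pp.2 n limit (((PySem.List.max? diffs (fun x => x)).getD 0) - 1).toNat 1
    ((PySem.List.max? diffs (fun x => x)).getD 0)

-- ===== PRECONDITION & SPEC =====
-- Pre_ excludes empty diffs (max([]) raises ValueError in A) and times shorter than diffs:
-- there A raises IndexError whenever its binary search runs, and on the remaining corner
-- (max(diffs) ≤ 1, where A returns without reading times) B's precomputation itself raises IndexError.
def Pre_solution (diffs : List Int) (times : List Int) (limit : Int) : Prop :=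
  diffs ≠ [] ∧ diffs.length ≤ times.length
instance (diffs : List Int) (times : List Int) (limit : Int) : Decidable (Pre_solution diffs times limit) := by unfold Pre_solution; infer_instance

def pvWitness_solution : List Int × List Int × Int := ([2, 3], [4, 5], 10)

def Spec_solution (diffs : List Int) (times : List Int) (limit : Int) (out : Int) : Prop := out = solution_alt diffs times limit
instance (diffs : List Int) (times : List Int) (limit : Int) (out : Int) : Decidable (Spec_solution diffs times limit out) := by unfold Spec_solution; infer_instance

-- ===== CLAIM (what is proved, stated in full; the proofs are below) =====
def Claim_equal_solution : Prop := ∀ (diffs : List Int) (times : List Int) (limit : Int), Dom_solution diffs times limit → Pre_solution diffs times limit → Spec_solution diffs times limit (solution diffs times limit)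

-- ===== LEMMAS AND PROOFS =====

-- proof-side views of the data
def pvD (diffs : List Int) (i : Nat) : Int := diffs.getD i 0
def pvT (times : List Int) (i : Nat) : Int := times.getD i 0
def pvC (times : List Int) (i : Nat) : Int :=
  pvT times i + (if 0 < i then pvT times (i - 1) else 0)
def pvP (diffs times : List Int) : List (Int × Int) :=
  (List.range diffs.length).map (fun i => (pvD diffs i, pvC times i))
def pvH (mid : Int) (p : Int × Int) : Int := if mid < p.1 then p.2 * (p.1 - mid) else 0
def pvPartial (f : Int × Int → Int) : List (Int × Int) → Int → List Int
  | [], _ => []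
  | p :: t, s => (s + f p) :: pvPartial f t (s + f p)

theorem pv_sum_map_add {α : Type} (l : List α) (f g : α → Int) :
    (l.map (fun x => f x + g x)).sum = (l.map f).sum + (l.map g).sum := by
  induction l with
  | nil => simp
  | cons a t ih => simp [ih]; ring

theorem pv_sum_mul_sub (l : List (Int × Int)) (mid : Int) :
    (l.map (fun p => p.2 * p.1)).sum - mid * (l.map (fun p => p.2)).sum
      = (l.map (fun p => p.2 * (p.1 - mid))).sum := by
  induction l with
  | nil => simp
  | cons a t ih => simp [← ih]; ring

theorem pv_sum_range_getD (xs : List Int) :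
    ∀ n, n ≤ xs.length → ((List.range n).map (fun i => xs.getD i 0)).sum = (xs.take n).sum := by
  intro n
  induction n with
  | zero => simp
  | succ n ih =>
      intro h
      rw [List.range_succ, List.map_append, List.sum_append, ih (by omega),
        List.sum_take_succ xs n (by omega)]
      simp only [List.map_cons, List.map_nil, List.sum_cons, List.sum_nil, add_zero]
      rw [List.getD_eq_getElem xs 0 (show n < xs.length by omega)]

theorem pv_timeA_eq (diffs times : List Int) (hn : diffs.length ≤ times.length) (mid : Int) :
    timeA diffs times mid =
      (times.take diffs.length).sum + ((pvP diffs times).map (pvH mid)).sum := by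
  unfold timeA
  rw [PySem.List.pyRange_zero_natCast, List.foldl_map]
  rw [PySem.List.foldl_congr_mem _ _
    (fun time (i : Nat) => time + (pvT times i + pvH mid (pvD diffs i, pvC times i))) 0 ?_]
  · rw [PySem.List.foldl_add, pv_sum_map_add]
    have hT : pvT times = fun i => times.getD i 0 := rfl
    rw [hT, pv_sum_range_getD times diffs.length hn]
    unfold pvP
    rw [List.map_map]
    simp only [Function.comp_def, zero_add]
  · intro acc i hi
    simp only [PySem.List.pyGetD_natCast, Int.natCast_pos, pvT, pvC, pvD, pvH]
    by_cases h0 : 0 < i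
    · have hcast : ((i : Int) - 1) = ((i - 1 : Nat) : Int) := by omega
      simp only [hcast, PySem.List.pyGetD_natCast, if_pos h0]
      split_ifs with h1 h2 <;> first | (exfalso; omega) | ring
    · simp only [if_neg h0]
      split_ifs with h1 h2 <;> first | (exfalso; omega) | ring

theorem pv_arg_eq (diffs times : List Int) :
    (PySem.List.pyRange 0 (diffs.length : Int) 1).map (fun i =>
      (PySem.List.pyGetD diffs i 0,
       PySem.List.pyGetD times i 0 +
         (if 0 < i then PySem.List.pyGetD times (i - 1) 0 else 0)))
      = pvP diffs times := by
  rw [PySem.List.pyRange_zero_natCast, List.map_map]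
  unfold pvP
  apply List.map_congr_left
  intro i hi
  simp only [Function.comp_apply, PySem.List.pyGetD_natCast, Int.natCast_pos,
    pvD, pvT, pvC, Prod.mk.injEq, true_and]
  by_cases h0 : 0 < i
  · have hcast : ((i : Int) - 1) = ((i - 1 : Nat) : Int) := by omega
    simp only [hcast, PySem.List.pyGetD_natCast, if_pos h0]
  · simp only [if_neg h0]

theorem pv_bPairs_eq (diffs times : List Int) :
    bPairs diffs times = PySem.List.sorted (pvP diffs times) (fun p => p.1) false := by
  unfold bPairs
  rw [pv_arg_eq]

theorem pv_fold_prefix :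
    ∀ (q : List (Int × Int)) (s0 s1 : Int) (l0 l1 : List Int),
      q.foldl (fun (st : Int × Int × List Int × List Int) dc =>
          let s0 := st.1 + dc.2
          let s1 := st.2.1 + dc.2 * dc.1
          (s0, s1, st.2.2.1 ++ [s0], st.2.2.2 ++ [s1])) (s0, s1, l0, l1)
        = (s0 + (q.map (fun p => p.2)).sum, s1 + (q.map (fun p => p.2 * p.1)).sum,
           l0 ++ pvPartial (fun p => p.2) q s0, l1 ++ pvPartial (fun p => p.2 * p.1) q s1) := by
  intro q
  induction q with
  | nil => intro s0 s1 l0 l1; simp [pvPartial]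
  | cons p t ih =>
      intro s0 s1 l0 l1
      rw [List.foldl_cons, ih]
      simp only [pvPartial, List.map_cons, List.sum_cons, List.append_assoc,
        List.singleton_append, Prod.mk.injEq]
      exact ⟨by ring, by ring, trivial⟩


theorem pv_bPrefix_eq (q : List (Int × Int)) :
    bPrefix q = (0 :: pvPartial (fun p => p.2) q 0, 0 :: pvPartial (fun p => p.2 * p.1) q 0) := by
  unfold bPrefix
  rw [pv_fold_prefix]
  simp

theorem pv_partial_getD (f : Int × Int → Int) :
    ∀ (q : List (Int × Int)) (k : Nat) (s : Int), k ≤ q.length →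
      (s :: pvPartial f q s).getD k 0 = s + ((q.take k).map f).sum := by
  intro q
  induction q with
  | nil =>
      intro k s hk
      have : k = 0 := by simpa using hk
      simp [this]
  | cons p t ih =>
      intro k s hk
      cases k with
      | zero => simp
      | succ k =>
          rw [List.getD_cons_succ]
          show ((s + f p) :: pvPartial f t (s + f p)).getD k 0 = _
          rw [ih k (s + f p) (by simpa using hk)]
          simp [List.take_succ_cons]
          ring

theorem pv_bisect_spec (ds : List Int) (mid : Int)
    (hds : ∀ i j : Nat, i ≤ j → j < ds.length → ds.getD i 0 ≤ ds.getD j 0) :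
    ∀ (fuel : Nat) (lo hi : Int), (hi - lo).toNat ≤ fuel → 0 ≤ lo → lo ≤ hi →
      hi ≤ (ds.length : Int) →
      (∀ j : Nat, (j : Int) < lo → ds.getD j 0 ≤ mid) →
      (∀ j : Nat, hi ≤ (j : Int) → j < ds.length → mid < ds.getD j 0) →
      ∃ kn : Nat, bisectB ds mid fuel lo hi = (kn : Int) ∧ kn ≤ ds.length ∧
        (∀ j : Nat, j < kn → ds.getD j 0 ≤ mid) ∧
        (∀ j : Nat, kn ≤ j → j < ds.length → mid < ds.getD j 0) := by
  intro fuel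
  induction fuel with
  | zero =>
      intro lo hi hf h0 hlh hlen hpre hpost
      have heq : hi = lo := by omega
      refine ⟨lo.toNat, by show lo = ((lo.toNat : Nat) : Int); omega, by omega, ?_, ?_⟩
      · intro j hj; exact hpre j (by omega)
      · intro j hj hjl; exact hpost j (by omega) hjl
  | succ fuel ih =>
      intro lo hi hf h0 hlh hlen hpre hpost
      rw [bisectB]
      by_cases hlt : lo < hi
      · have e : PySem.Int.floordiv (lo + hi) 2 = (lo + hi) / 2 :=
          PySem.Int.floordiv_eq_ediv_of_pos (by norm_num)
        have hm0 : (0:Int) ≤ (lo + hi) / 2 := by omega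
        have hmlt : (lo + hi) / 2 < (ds.length : Int) := by omega
        have hmlo : lo ≤ (lo + hi) / 2 := by omega
        have hmhi : (lo + hi) / 2 < hi := by omega
        rw [if_pos hlt]
        simp only [e]
        rw [PySem.List.pyGetD_eq_getElem ds 0 hm0 hmlt]
        set mt := ((lo + hi) / 2).toNat with hmt
        have hmtlen : mt < ds.length := by omega
        have hget : ds[mt] = ds.getD mt 0 := by
          rw [List.getD_eq_getElem ds 0 hmtlen]
        by_cases hc : ds[mt] ≤ mid
        · rw [if_pos hc]
          apply ih ((lo + hi) / 2 + 1) hi (by omega) (by omega) (by omega) hlen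
          · intro j hj
            have hjmt : j ≤ mt := by omega
            have := hds j mt hjmt hmtlen
            omega
          · exact hpost
        · rw [if_neg hc]
          apply ih lo ((lo + hi) / 2) (by omega) h0 (by omega) (by omega) hpre
          intro j hj hjl
          have := hds mt j (by omega) hjl
          omega
      · have heq : hi = lo := by omega
        rw [if_neg hlt]
        refine ⟨lo.toNat, by omega, by omega, ?_, ?_⟩
        · intro j hj; exact hpre j (by omega)
        · intro j hj hjl; exact hpost j (by omega) hjl

theorem times_eq (diffs times : List Int) (hn : diffs.length ≤ times.length) (mid : Int) :
    timeA diffs times mid =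
      timeB ((PySem.List.slice times none (some (diffs.length : Int))).sum)
        ((bPairs diffs times).map (fun p => p.1))
        (bPrefix (bPairs diffs times)).1 (bPrefix (bPairs diffs times)).2
        (diffs.length : Int) mid := by
  have hQs : bPairs diffs times = PySem.List.sorted (pvP diffs times) (fun p => p.1) false :=
    pv_bPairs_eq diffs times
  have hperm : (bPairs diffs times).Perm (pvP diffs times) := by
    rw [hQs]; exact PySem.List.sorted_perm _ _ _
  have hQlen : (bPairs diffs times).length = diffs.length := by
    rw [hperm.length_eq]; simp [pvP]
  have hdslen : ((bPairs diffs times).map (fun p => p.1)).length = diffs.length := by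
    simp [hQlen]
  have hpw : ((bPairs diffs times).map (fun p => p.1)).Pairwise (· ≤ ·) := by
    rw [hQs]; exact PySem.List.sorted_map_key_pairwise _ _
  have hds : ∀ i j : Nat, i ≤ j → j < ((bPairs diffs times).map (fun p => p.1)).length →
      ((bPairs diffs times).map (fun p => p.1)).getD i 0
        ≤ ((bPairs diffs times).map (fun p => p.1)).getD j 0 := by
    intro i j hij hj
    rcases Nat.eq_or_lt_of_le hij with rfl | hlt
    · exact le_refl _
    · rw [List.getD_eq_getElem _ 0 (by omega), List.getD_eq_getElem _ 0 hj]
      exact List.pairwise_iff_getElem.1 hpw i j (by omega) hj hlt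
  obtain ⟨kn, hkeq, hkle, hpre, hpost⟩ :=
    pv_bisect_spec ((bPairs diffs times).map (fun p => p.1)) mid hds
      ((diffs.length : Int)).toNat 0 (diffs.length : Int) (by omega) (by omega) (by omega)
      (by rw [hdslen])
      (by intro j hj; exfalso; omega)
      (by intro j hj hjl; exfalso; rw [hdslen] at hjl; omega)
  rw [hdslen] at hkle
  show timeA diffs times mid =
    (PySem.List.slice times none (some (diffs.length : Int))).sum +
      (PySem.List.pyGetD (bPrefix (bPairs diffs times)).2 (diffs.length : Int) 0 -
        PySem.List.pyGetD (bPrefix (bPairs diffs times)).2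
          (bisectB ((bPairs diffs times).map (fun p => p.1)) mid
            ((diffs.length : Int)).toNat 0 (diffs.length : Int)) 0) -
      mid * (PySem.List.pyGetD (bPrefix (bPairs diffs times)).1 (diffs.length : Int) 0 -
        PySem.List.pyGetD (bPrefix (bPairs diffs times)).1
          (bisectB ((bPairs diffs times).map (fun p => p.1)) mid
            ((diffs.length : Int)).toNat 0 (diffs.length : Int)) 0)
  rw [hkeq, pv_bPrefix_eq, PySem.List.slice_to_natCast]
  simp only [PySem.List.pyGetD_natCast]
  rw [pv_partial_getD _ (bPairs diffs times) diffs.length 0 (by omega),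
      pv_partial_getD _ (bPairs diffs times) kn 0 (by omega),
      pv_partial_getD _ (bPairs diffs times) diffs.length 0 (by omega),
      pv_partial_getD _ (bPairs diffs times) kn 0 (by omega)]
  rw [show (bPairs diffs times).take diffs.length = bPairs diffs times by
        rw [← hQlen]; exact List.take_length]
  rw [pv_timeA_eq diffs times hn mid]
  have hsum : ((pvP diffs times).map (pvH mid)).sum = ((bPairs diffs times).map (pvH mid)).sum :=
    ((hperm.map (pvH mid)).sum_eq).symm
  rw [hsum]
  have htake : ∀ p ∈ (bPairs diffs times).take kn, p.1 ≤ mid := by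
    intro p hp
    obtain ⟨i, hi, rfl⟩ := List.getElem_of_mem hp
    have hik : i < kn := by
      have := hi; rw [List.length_take] at this; omega
    have hiq : i < (bPairs diffs times).length := by omega
    have h1 := hpre i hik
    rw [List.getD_eq_getElem _ 0 (by simp [hQlen]; omega), List.getElem_map] at h1
    rw [List.getElem_take]
    exact h1
  have hdrop : ∀ p ∈ (bPairs diffs times).drop kn, mid < p.1 := by
    intro p hp
    obtain ⟨i, hi, rfl⟩ := List.getElem_of_mem hp
    have hilen : kn + i < (bPairs diffs times).length := by
      have := hi; rw [List.length_drop] at this; omega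
    have h2 := hpost (kn + i) (by omega) (by simp [hQlen]; omega)
    rw [List.getD_eq_getElem _ 0 (by simp [hQlen]; omega), List.getElem_map] at h2
    rw [List.getElem_drop]
    exact h2
  have htake0 : (((bPairs diffs times).take kn).map (pvH mid)).sum = 0 := by
    apply List.sum_eq_zero
    intro x hx
    obtain ⟨p, hp, rfl⟩ := List.mem_map.1 hx
    unfold pvH
    rw [if_neg (not_lt.2 (htake p hp))]
  have hdrop1 : (((bPairs diffs times).drop kn).map (pvH mid)).sum
      = (((bPairs diffs times).drop kn).map (fun p => p.2 * (p.1 - mid))).sum := by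
    congr 1
    apply List.map_congr_left
    intro p hp
    unfold pvH
    rw [if_pos (hdrop p hp)]
  have hQsplit : ((bPairs diffs times).take kn) ++ ((bPairs diffs times).drop kn)
      = bPairs diffs times := List.take_append_drop kn (bPairs diffs times)
  conv_lhs => rw [← hQsplit]
  conv_rhs => rw [← hQsplit]
  simp only [List.map_append, List.sum_append]
  rw [htake0, hdrop1, ← pv_sum_mul_sub ((bPairs diffs times).drop kn) mid]
  rw [hQsplit]
  ring

theorem loops_eq (diffs times : List Int) (limit total : Int) (ds p0 p1 : List Int) (n : Int)
    (ht : ∀ m, timeA diffs times m = timeB total ds p0 p1 n m) :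
    ∀ (fuel : Nat) (l r : Int),
      loopA diffs times limit fuel l r = loopB total ds p0 p1 n limit fuel l r := by
  intro fuel
  induction fuel with
  | zero => intro l r; rfl
  | succ fuel ih =>
      intro l r
      rw [loopA, loopB]
      simp only [ht, ih]

-- ===== VERDICT (by name: the statement is the Claim_ definition above) =====
theorem solution_spec : Claim_equal_solution := by
  intro diffs times limit _ hpre
  unfold Spec_solution solution solution_alt
  exact loops_eq diffs times limit _ _ _ _ _
    (times_eq diffs times hpre.2) _ 1 _
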